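-- pv_equiv track=rewrite | github.com/tuancamtbtx/data-pipeline-tool | libs/py-workflow/src/py_workflow/pipeline/render.py | _find_macro_values
-- ===== SOURCE A (Python) =====
-- def _find_macro_values(value: str) -> list:
--     macro_values = []
--     start_pos = 0
--
--     while True:
--         start = value.find("{{", start_pos)
--         end = value.find("}}", start)
--
--         if start == -1 or end == -1:
--             break
--
--         macro_value = value[start + 2 : end].strip()
--         macro_values.append(macro_value)
--
--         start_pos = end + 2
--
--     return macro_values
-- ===== SOURCE B (Python) =====
-- def _find_macro_values(value: str) -> list:
--     # single left-to-right character scan with an outside/inside state machine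
--     out = []
--     buf = None  # None = outside a macro; otherwise list of chars collected inside
--     i = 0
--     n = len(value)
--     while i < n:
--         if buf is None:
--             if value.startswith("{{", i):
--                 buf = []
--                 i += 2
--             else:
--                 i += 1
--         else:
--             if value.startswith("}}", i):
--                 out.append("".join(buf).strip())
--                 buf = None
--                 i += 2
--             else:
--                 buf.append(value[i])
--                 i += 1
--     return out
-- ===== Notes on version B (the rewrite author's own statement) =====
-- stated objective: alternative
-- what changed: Replaced the find('{{')/find('}}') jump loop with a single left-to-right character scan using an outside/inside state machine that buffers macro characters.
import Mathlib
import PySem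

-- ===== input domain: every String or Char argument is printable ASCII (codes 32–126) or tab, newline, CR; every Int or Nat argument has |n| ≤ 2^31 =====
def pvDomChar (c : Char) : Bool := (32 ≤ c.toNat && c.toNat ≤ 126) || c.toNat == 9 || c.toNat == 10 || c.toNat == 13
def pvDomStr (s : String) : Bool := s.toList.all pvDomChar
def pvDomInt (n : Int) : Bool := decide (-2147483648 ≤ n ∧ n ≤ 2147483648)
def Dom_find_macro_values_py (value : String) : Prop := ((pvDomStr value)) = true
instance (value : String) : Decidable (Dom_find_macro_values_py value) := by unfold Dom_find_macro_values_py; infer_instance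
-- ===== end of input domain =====

-- B replaces A's find("{{")/find("}}") jump loop by a one-character-at-a-time
-- outside/inside state-machine scan; alternative decomposition, same asymptotic cost.

-- ===== PORT A =====
-- while True: start = value.find("{{", start_pos); end = value.find("}}", start); break/append; start_pos = end + 2
-- fuel = length + 1 bounds the iteration count (start_pos grows by ≥ 2 each round)
def loopA (s : List Char) (acc : List String) (start_pos : Int) : Nat → List String
  | 0 => acc
  | fuel + 1 =>
    let start := PySem.Chars.findFrom s ['{', '{'] start_pos none
    let e := PySem.Chars.findFrom s ['}', '}'] start none
    if start = -1 ∨ e = -1 then acc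
    else
      loopA s
        (acc ++ [String.ofList (PySem.Chars.strip (PySem.Chars.slice s (some (start + 2)) (some e)))])
        (e + 2) fuel

def find_macro_values_py (value : String) : List String :=
  loopA value.toList [] 0 (value.toList.length + 1)

-- ===== PORT B =====
-- state machine: scanOut = outside a macro, scanIn buf = inside, collecting chars
mutual
def scanOut : List Char → List String
  | '{' :: '{' :: rest => scanIn rest []
  | _ :: rest => scanOut rest
  | [] => []
def scanIn : List Char → List Char → List String
  | '}' :: '}' :: rest, buf => String.ofList (PySem.Chars.strip buf) :: scanOut rest
  | c :: rest, buf => scanIn rest (buf ++ [c])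
  | [], _ => []
end

def find_macro_values_py_alt (value : String) : List String :=
  scanOut value.toList

-- ===== PRECONDITION & SPEC =====
def Spec_find_macro_values_py (value : String) (out : List String) : Prop := out = find_macro_values_py_alt value
instance (value : String) (out : List String) : Decidable (Spec_find_macro_values_py value out) := by unfold Spec_find_macro_values_py; infer_instance

-- ===== CLAIM (what is proved, stated in full; the proofs are below) =====
def Claim_equal_find_macro_values_py : Prop := ∀ (value : String), Dom_find_macro_values_py value → Spec_find_macro_values_py value (find_macro_values_py value)

-- ===== LEMMAS AND PROOFS =====

theorem scanOut_cons_cons (c1 c2 : Char) (t : List Char) :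
    scanOut (c1 :: c2 :: t) = if c1 = '{' ∧ c2 = '{' then scanIn t [] else scanOut (c2 :: t) := by
  by_cases h1 : c1 = '{' <;> by_cases h2 : c2 = '{' <;> simp [scanOut, h1, h2]

theorem scanIn_cons_cons (c1 c2 : Char) (t buf : List Char) :
    scanIn (c1 :: c2 :: t) buf =
      if c1 = '}' ∧ c2 = '}' then String.ofList (PySem.Chars.strip buf) :: scanOut t
      else scanIn (c2 :: t) (buf ++ [c1]) := by
  by_cases h1 : c1 = '}' <;> by_cases h2 : c2 = '}' <;> simp [scanIn, h1, h2]

-- Source B's scan never opens a macro when "{{" occurs nowhere in the suffix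
theorem scanOut_no_open (l : List Char) (h : ∀ j, ¬ ['{','{'] <+: l.drop j) : scanOut l = [] := by
  induction l with
  | nil => rfl
  | cons c t ih =>
    cases t with
    | nil => simp [scanOut]
    | cons c2 t' =>
      rw [scanOut_cons_cons]
      have h0 := h 0
      simp only [List.drop_zero] at h0
      have hne : ¬ (c = '{' ∧ c2 = '{') := by
        intro ⟨h1, h2⟩; exact h0 (by simp [h1, h2, List.cons_prefix_cons])
      rw [if_neg hne]
      exact ih (fun j => h (j + 1))

theorem scanOut_skip_one (c : Char) (t : List Char) (h : ¬ ['{','{'] <+: c :: t) :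
    scanOut (c :: t) = scanOut t := by
  cases t with
  | nil => simp [scanOut]
  | cons c2 t' =>
    rw [scanOut_cons_cons, if_neg]
    intro ⟨h1, h2⟩; exact h (by simp [h1, h2, List.cons_prefix_cons])
theorem scanOut_drop_skip (s : List Char) (k d : Nat)
    (hmin : ∀ i, k ≤ i → i < k + d → ¬ ['{','{'] <+: s.drop i) :
    scanOut (s.drop k) = scanOut (s.drop (k + d)) := by
  induction d generalizing k with
  | zero => rfl
  | succ d ih =>
    by_cases hk : k < s.length
    · have hstep : scanOut (s.drop k) = scanOut (s.drop (k + 1)) := by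
        rw [List.drop_eq_getElem_cons hk]
        exact scanOut_skip_one _ _
          (by rw [← List.drop_eq_getElem_cons hk]; exact hmin k le_rfl (by omega))
      rw [hstep]
      have := ih (k + 1) (fun i h1 h2 => hmin i (by omega) (by omega))
      rwa [show k + 1 + d = k + (d + 1) from by omega] at this
    · rw [List.drop_eq_nil_of_le (by omega), List.drop_eq_nil_of_le (by omega)]

theorem scanIn_step_one (c : Char) (t buf : List Char) (h : ¬ ['}','}'] <+: c :: t) :
    scanIn (c :: t) buf = scanIn t (buf ++ [c]) := by
  cases t with
  | nil => simp [scanIn]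
  | cons c2 t' =>
    rw [scanIn_cons_cons, if_neg]
    intro ⟨h1, h2⟩; exact h (by simp [h1, h2, List.cons_prefix_cons])

theorem scanIn_no_close (l : List Char) (h : ∀ j, ¬ ['}','}'] <+: l.drop j) :
    ∀ buf, scanIn l buf = [] := by
  induction l with
  | nil => intro buf; rfl
  | cons c t ih =>
    intro buf
    rw [scanIn_step_one c t buf (by have := h 0; simpa using this)]
    exact ih (fun j => h (j + 1)) _

theorem scanIn_close (p : Nat) : ∀ (l buf : List Char),
    ['}','}'] <+: l.drop p → (∀ i, i < p → ¬ ['}','}'] <+: l.drop i) →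
    scanIn l buf =
      String.ofList (PySem.Chars.strip (buf ++ l.take p)) :: scanOut (l.drop (p + 2)) := by
  induction p with
  | zero =>
    intro l buf hp _
    simp only [List.drop_zero] at hp
    obtain ⟨t, rfl⟩ := hp
    simp [scanIn]
  | succ p ih =>
    intro l buf hp hmin
    cases l with
    | nil => simp at hp
    | cons c t =>
      rw [scanIn_step_one c t buf (by have := hmin 0 (by omega); simpa using this)]
      rw [ih t (buf ++ [c]) (by simpa using hp) (fun i hi => by
        have := hmin (i + 1) (by omega); simpa using this)]
      simp [List.append_assoc]

-- A's jump loop computes, from any resume point k, exactly B's scan of the suffix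
theorem loopA_eq (s : List Char) : ∀ (fuel k : Nat) (acc : List String),
    k ≤ s.length → s.length - k < fuel →
    loopA s acc (k : Int) fuel = acc ++ scanOut (s.drop k) := by
  intro fuel
  induction fuel with
  | zero => intro k acc _ h; omega
  | succ fuel ih =>
    intro k acc hk hfl
    rw [loopA]
    by_cases hstart : PySem.Chars.findFrom s ['{','{'] (k : Int) none = -1
    · rw [if_pos (Or.inl hstart)]
      have hni : ¬ ['{','{'] <:+: s.drop k :=
        (PySem.Chars.findFrom_natCast_eq_neg_one_iff s _ k hk).mp hstart
      have hno : ∀ j, ¬ ['{','{'] <+: (s.drop k).drop j := by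
        intro j hj
        exact hni ((PySem.Chars.isIn_iff_infix _ _).mp
          ((PySem.Chars.exists_prefix_drop_iff_isIn _ _).mp ⟨j, hj⟩))
      rw [scanOut_no_open _ hno, List.append_nil]
    · obtain ⟨hkle, hpre, hminO⟩ := PySem.Chars.findFrom_natCast_spec s ['{','{'] k hk hstart
      set st := PySem.Chars.findFrom s ['{','{'] (k : Int) none with hst
      have hstnn : 0 ≤ st := le_trans (Int.natCast_nonneg k) hkle
      set m := st.toNat with hm
      have hstm : st = (m : Int) := (Int.toNat_of_nonneg hstnn).symm
      have hkm : k ≤ m := by omega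
      obtain ⟨t, ht⟩ := hpre
      have hmlen : m + 2 ≤ s.length := by
        have hlen : (['{','{'] ++ t).length = (s.drop m).length := by rw [ht]
        simp only [List.length_append, List.length_cons, List.length_nil, List.length_drop] at hlen
        omega
      have hdm : s.drop m = '{' :: '{' :: s.drop (m + 2) := by
        have h1 : s.drop (m + 2) = (s.drop m).drop 2 := by
          rw [List.drop_drop]
        rw [h1, ← ht]; simp
      have hnoclose_m : ¬ ['}','}'] <+: s.drop m := by
        rw [hdm]; simp [List.cons_prefix_cons]
      have hnoclose_m1 : ¬ ['}','}'] <+: s.drop (m + 1) := by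
        have hd1 : s.drop (m + 1) = '{' :: s.drop (m + 2) := by
          have h1 : s.drop (m + 1) = (s.drop m).drop 1 := by rw [List.drop_drop]
          rw [h1, hdm]; simp
        rw [hd1]; simp [List.cons_prefix_cons]
      have hmlen' : m ≤ s.length := by omega
      have hscanOut : scanOut (s.drop k) = scanIn (s.drop (m + 2)) [] := by
        have h1 : scanOut (s.drop k) = scanOut (s.drop m) := by
          have := scanOut_drop_skip s k (m - k) (fun i h1 h2 => hminO i h1 (by omega))
          rwa [show k + (m - k) = m from by omega] at this
        rw [h1, hdm, scanOut_cons_cons, if_pos ⟨rfl, rfl⟩]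
      rw [hstm]
      by_cases he : PySem.Chars.findFrom s ['}','}'] ((m : Int)) none = -1
      · rw [if_pos (Or.inr he)]
        have hni : ¬ ['}','}'] <:+: s.drop m :=
          (PySem.Chars.findFrom_natCast_eq_neg_one_iff s _ m hmlen').mp he
        have hno : ∀ j, ¬ ['}','}'] <+: (s.drop (m + 2)).drop j := by
          intro j hj
          rw [List.drop_drop] at hj
          have h2 : ['}','}'] <+: (s.drop m).drop (2 + j) := by
            rw [List.drop_drop, show m + (2 + j) = m + 2 + j from by omega]
            exact hj
          exact hni ((PySem.Chars.isIn_iff_infix _ _).mp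
            ((PySem.Chars.exists_prefix_drop_iff_isIn _ _).mp ⟨2 + j, h2⟩))
        rw [hscanOut, scanIn_no_close _ hno, List.append_nil]
      · obtain ⟨hmle, hpreE, hminE⟩ := PySem.Chars.findFrom_natCast_spec s ['}','}'] m hmlen' he
        rw [if_neg (by push Not; exact ⟨by rw [← hstm]; exact hstart, he⟩)]
        set ev := PySem.Chars.findFrom s ['}','}'] ((m : Int)) none with hev
        have hevnn : 0 ≤ ev := le_trans (Int.natCast_nonneg m) hmle
        set p := ev.toNat with hp
        have hevp : ev = (p : Int) := (Int.toNat_of_nonneg hevnn).symm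
        have hmp : m + 2 ≤ p := by
          rcases Nat.lt_or_ge p (m + 2) with hlt | hge
          · have hcases : p = m ∨ p = m + 1 := by omega
            rcases hcases with hc | hc
            · exact absurd (hc ▸ hpreE) hnoclose_m
            · exact absurd (hc ▸ hpreE) hnoclose_m1
          · exact hge
        obtain ⟨t2, ht2⟩ := hpreE
        have hplen : p + 2 ≤ s.length := by
          have hlen : (['}','}'] ++ t2).length = (s.drop p).length := by rw [ht2]
          simp only [List.length_append, List.length_cons, List.length_nil, List.length_drop] at hlen
          omega
        have hslice : PySem.Chars.slice s (some ((m : Int) + 2)) (some ev) =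
            (s.drop (m + 2)).take (p - (m + 2)) := by
          rw [hevp, show ((m : Int) + 2) = ((m + 2 : Nat) : Int) from by push_cast; ring]
          exact PySem.List.slice_natCast s (m + 2) p
        have hclose : scanIn (s.drop (m + 2)) [] =
            String.ofList (PySem.Chars.strip ([] ++ (s.drop (m + 2)).take (p - (m + 2)))) ::
              scanOut ((s.drop (m + 2)).drop (p - (m + 2) + 2)) := by
          apply scanIn_close
          · rw [List.drop_drop, show m + 2 + (p - (m + 2)) = p from by omega]
            exact ⟨t2, ht2⟩
          · intro i hi
            rw [List.drop_drop]
            exact hminE (m + 2 + i) (by omega) (by omega)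
        have hdropp : (s.drop (m + 2)).drop (p - (m + 2) + 2) = s.drop (p + 2) := by
          rw [List.drop_drop]; congr 1; omega
        have hrec := ih (p + 2)
          (acc ++ [String.ofList (PySem.Chars.strip (PySem.Chars.slice s (some ((m : Int) + 2)) (some ev)))])
          hplen (by omega)
        rw [show ev + 2 = ((p + 2 : Nat) : Int) from by rw [hevp]; push_cast; ring, hrec,
          hscanOut, hclose, hdropp, hslice]
        simp

-- ===== VERDICT (by name: the statement is the Claim_ definition above) =====
theorem find_macro_values_py_spec : Claim_equal_find_macro_values_py := by
  intro value _
  unfold Spec_find_macro_values_py find_macro_values_py find_macro_values_py_alt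
  have := loopA_eq value.toList (value.toList.length + 1) 0 [] (by omega) (by omega)
  simpa using this
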